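-- pv_equiv track=rewrite | github.com/liang-8421/pytorch_ner_test | preprocess/utils/split_text.py | split_text_by_sentence
-- ===== SOURCE A (Python) =====
-- def check_split_right(text, split_text, split_index):
--     # 检查首字是否正确
--     for index, value in enumerate(split_text):
--         assert value[0] == text[split_index[index]]
--     # 检查拼接之后是否正确
--     temp_text = ""
--     for i in split_text:
--         temp_text += i
--     assert temp_text == text
--
-- def split_text_by_sentence(text, max_length):
--     split_punctuation = ["。", "！", "!"]
--     split_sentences, split_index = [], [0]
--     for char_index, char in enumerate(text):
--         if char in split_punctuation:
--             split_sentences.append(text[split_index[-1]:char_index + 1])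
--             split_index.append(char_index + 1)
--
--     split_sentences.append(text[split_index[-1]:])
--
--     # 验证一句话不能超过512个字符
--     for i in split_sentences:
--         assert len(i) <= max_length
--
--     last_sentence, current_sentence = "", ""
--     new_split_sentences, new_split_index = [], [0]
--     for index, sentence in enumerate(split_sentences):
--         current_sentence += sentence
--         if len(current_sentence) > max_length:
--             current_sentence = sentence
--             new_split_sentences.append(last_sentence)
--             new_split_index.append(split_index[index])
--         last_sentence = current_sentence
--     new_split_sentences.append(last_sentence)
--
--     # 验证下切完之后是否正确
--     check_split_right(text, new_split_sentences, new_split_index)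
--
--     return new_split_sentences, new_split_index
-- ===== SOURCE B (Python) =====
-- def split_text_by_sentence(text, max_length):
--     # One fused pass (keeping A's per-sentence length check): split at sentence terminators and greedily pack chunks
--     # as we go, instead of building the intermediate sentence list first.
--     terminators = ("。", "！", "!")
--     new_split_sentences, new_split_index = [], [0]
--     chunk = ""
--     sentence_start = 0
--     for i, ch in enumerate(text):
--         if ch in terminators:
--             sentence = text[sentence_start:i + 1]
--             assert len(sentence) <= max_length
--             if len(chunk) + len(sentence) > max_length:
--                 new_split_sentences.append(chunk)
--                 new_split_index.append(sentence_start)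
--                 chunk = sentence
--             else:
--                 chunk += sentence
--             sentence_start = i + 1
--     sentence = text[sentence_start:]
--     assert len(sentence) <= max_length
--     if len(chunk) + len(sentence) > max_length:
--         new_split_sentences.append(chunk)
--         new_split_index.append(sentence_start)
--         chunk = sentence
--     else:
--         chunk += sentence
--     new_split_sentences.append(chunk)
--     return new_split_sentences, new_split_index
-- ===== Notes on version B (the rewrite author's own statement) =====
-- stated objective: alternative
-- what changed: A first builds the full list of sentences plus their index list and then runs a second merge loop (and re-validates with check_split_right); B fuses everything into a single scan that checks and packs each completed sentence into the current chunk on the fly, never materialising the intermediate sentence list.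
import Mathlib
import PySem

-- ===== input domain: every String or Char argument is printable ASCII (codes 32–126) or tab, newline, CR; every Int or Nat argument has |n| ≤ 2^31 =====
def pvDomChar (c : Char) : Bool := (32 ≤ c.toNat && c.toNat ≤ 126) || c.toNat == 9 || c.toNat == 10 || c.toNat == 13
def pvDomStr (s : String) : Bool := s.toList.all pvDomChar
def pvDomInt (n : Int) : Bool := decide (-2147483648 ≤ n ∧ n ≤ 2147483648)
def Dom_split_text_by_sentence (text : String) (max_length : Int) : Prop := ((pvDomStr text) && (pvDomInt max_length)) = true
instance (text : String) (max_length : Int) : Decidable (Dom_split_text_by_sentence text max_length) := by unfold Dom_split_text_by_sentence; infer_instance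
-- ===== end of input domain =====

-- B fuses A's split pass and merge pass into one scan over the characters (objective: alternative, same O(n) cost).
-- A's asserts/check_split_right always pass inside Pre_ and raise outside it, so the ports omit them; Pre_ excludes exactly the raising inputs.

-- ===== PORT A =====
-- `char in ["。", "！", "!"]`
def pvPunct (c : Char) : Bool := c == '。' || c == '！' || c == '!'

-- first loop: collect sentences and split indices; strings kept as List Char (PySem convention)
def pvAStep1 (cs : List Char) (st : List (List Char) × List Int) (p : Int × Char) :
    List (List Char) × List Int :=
  if pvPunct p.2 then
    -- split_index[-1] is in range: split_index starts as [0] and only grows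
    (st.1 ++ [PySem.List.slice cs (some (PySem.List.pyGetD st.2 (-1) 0)) (some (p.1 + 1))],
     st.2 ++ [p.1 + 1])
  else st

-- second loop: state (last_sentence, current_sentence, new_split_sentences, new_split_index)
def pvAStep2 (si : List Int) (max_length : Int)
    (st : List Char × List Char × List (List Char) × List Int) (p : Int × List Char) :
    List Char × List Char × List (List Char) × List Int :=
  let cur := st.2.1 ++ p.2
  if max_length < (cur.length : Int) then
    -- split_index[index] is in range: index < len(split_sentences) = len(split_index)
    (p.2, p.2, st.2.2.1 ++ [st.1], st.2.2.2 ++ [PySem.List.pyGetD si p.1 0])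
  else (cur, cur, st.2.2.1, st.2.2.2)

def split_text_by_sentence (text : String) (max_length : Int) : List String × List Int :=
  let cs := text.toList
  let r1 := (PySem.List.enumerate cs 0).foldl (pvAStep1 cs) ([], [0])
  let split_sentences := r1.1 ++ [PySem.List.slice cs (some (PySem.List.pyGetD r1.2 (-1) 0)) none]
  -- (the `assert len(i) <= max_length` loop raises outside Pre_ and is a no-op inside it)
  let r2 := (PySem.List.enumerate split_sentences 0).foldl (pvAStep2 r1.2 max_length) ([], [], [], [0])
  ((r2.2.2.1 ++ [r2.1]).map String.ofList, r2.2.2.2)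

-- ===== PORT B =====
-- state (new_split_sentences, new_split_index, chunk, sentence_start)
def pvBStep (cs : List Char) (max_length : Int)
    (st : List (List Char) × List Int × List Char × Int) (p : Int × Char) :
    List (List Char) × List Int × List Char × Int :=
  if pvPunct p.2 then
    let s := PySem.List.slice cs (some st.2.2.2) (some (p.1 + 1))
    if max_length < (st.2.2.1.length : Int) + (s.length : Int) then
      (st.1 ++ [st.2.2.1], st.2.1 ++ [st.2.2.2], s, p.1 + 1)
    else (st.1, st.2.1, st.2.2.1 ++ s, p.1 + 1)
  else st

def split_text_by_sentence_alt (text : String) (max_length : Int) : List String × List Int :=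
  let cs := text.toList
  let r := (PySem.List.enumerate cs 0).foldl (pvBStep cs max_length) ([], [0], [], 0)
  let s := PySem.List.slice cs (some r.2.2.2) none
  let r2 := if max_length < (r.2.2.1.length : Int) + (s.length : Int) then
      (r.1 ++ [r.2.2.1], r.2.1 ++ [r.2.2.2], s)
    else (r.1, r.2.1, r.2.2.1 ++ s)
  ((r2.1 ++ [r2.2.2]).map String.ofList, r2.2.1)

-- ===== PRECONDITION & SPEC =====
-- Pre_ = exactly the inputs where the Python A returns: text nonempty and every sentence fits in
-- max_length, stated window-wise: a terminator-free window of the text, extended by its closing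
-- terminator if it has one, is no longer than max_length.
def Pre_split_text_by_sentence (text : String) (max_length : Int) : Prop :=
  text.toList ≠ [] ∧
    ∀ i ∈ List.range (text.toList.length + 1), ∀ j ∈ List.range (text.toList.length + 1),
      i ≤ j → (∀ k ∈ List.range j, i ≤ k → pvPunct (text.toList.getD k ' ') = false) →
      (if j < text.toList.length then (j : Int) - (i : Int) + 1 ≤ max_length
       else (j : Int) - (i : Int) ≤ max_length)
instance (text : String) (max_length : Int) : Decidable (Pre_split_text_by_sentence text max_length) := by
  unfold Pre_split_text_by_sentence; infer_instance

def pvWitness_split_text_by_sentence : String × Int := ("a!b", 2)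

def Spec_split_text_by_sentence (text : String) (max_length : Int) (out : List String × List Int) : Prop := out = split_text_by_sentence_alt text max_length
instance (text : String) (max_length : Int) (out : List String × List Int) : Decidable (Spec_split_text_by_sentence text max_length out) := by unfold Spec_split_text_by_sentence; infer_instance

-- ===== CLAIM (what is proved, stated in full; the proofs are below) =====
def Claim_equal_split_text_by_sentence : Prop := ∀ (text : String) (max_length : Int), Dom_split_text_by_sentence text max_length → Pre_split_text_by_sentence text max_length → Spec_split_text_by_sentence text max_length (split_text_by_sentence text max_length)

-- ===== LEMMAS AND PROOFS =====

-- collapsed merge step (A's loop2 with last_sentence = current_sentence folded away):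
-- state (current chunk, finished chunks, chunk start indices), input (sentence start, sentence)
def pvM (max_length : Int) (st : List Char × List (List Char) × List Int) (p : Int × List Char) :
    List Char × List (List Char) × List Int :=
  if max_length < ((st.1 ++ p.2).length : Int) then (p.2, st.2.1 ++ [st.1], st.2.2 ++ [p.1])
  else (st.1 ++ p.2, st.2.1, st.2.2)

-- uncollapsed merge step: pvAStep2 with the index lookup already resolved
def pvM2 (max_length : Int) (st : List Char × List Char × List (List Char) × List Int)
    (p : Int × List Char) : List Char × List Char × List (List Char) × List Int :=
  let cur := st.2.1 ++ p.2
  if max_length < (cur.length : Int) then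
    (p.2, p.2, st.2.2.1 ++ [st.1], st.2.2.2 ++ [p.1])
  else (cur, cur, st.2.2.1, st.2.2.2)

-- A's loop2 over enumerate+pyGetD equals a fold over zip split_index split_sentences
theorem pvL1 (si : List Int) (max_length : Int) (xs : List (List Char)) :
    ∀ (k : Nat) st, k + xs.length ≤ si.length →
    (PySem.List.enumerate xs (k : Int)).foldl (pvAStep2 si max_length) st =
      ((si.drop k).zip xs).foldl (pvM2 max_length) st := by
  induction xs with
  | nil => intro k st _; simp [PySem.List.enumerate]
  | cons x xs ih =>
    intro k st h
    have hk : k < si.length := by simp at h; omega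
    have hdrop : si.drop k = si[k] :: si.drop (k + 1) := List.drop_eq_getElem_cons hk
    rw [PySem.List.enumerate_cons, hdrop]
    simp only [List.zip_cons_cons, List.foldl_cons]
    have hstep : pvAStep2 si max_length st ((k : Int), x) = pvM2 max_length st (si[k], x) := by
      simp only [pvAStep2, pvM2, PySem.List.pyGetD_natCast]
      rw [List.getD_eq_getElem si 0 hk]
    rw [hstep, show ((k : Int) + 1) = ((k + 1 : Nat) : Int) by push_cast; ring,
      ih (k + 1) _ (by simp at h ⊢; omega)]

-- last_sentence = current_sentence at every loop boundary of A's loop2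
theorem pvL2 (max_length : Int) (l : List (Int × List Char)) :
    ∀ (x : List Char) (nss : List (List Char)) (nsi : List Int),
    l.foldl (pvM2 max_length) (x, x, nss, nsi) =
      (let r := l.foldl (pvM max_length) (x, nss, nsi); (r.1, r.1, r.2.1, r.2.2)) := by
  induction l with
  | nil => intro x nss nsi; rfl
  | cons p l ih =>
    intro x nss nsi
    simp only [List.foldl_cons, pvM, pvM2]
    split <;> rw [ih]

-- zip with a one-longer index list (optionally extended on the right), sentence appended
theorem pvL3 {β : Type} (s : β) (v : Int) :
    ∀ (ss : List β) (si tail : List Int), si.length = ss.length + 1 → si.getLast? = some v →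
    (si ++ tail).zip (ss ++ [s]) = si.zip ss ++ [(v, s)] := by
  intro ss
  induction ss with
  | nil =>
    intro si tail h hv
    match si, h with
    | [a], _ => simp at hv; simp [hv]
  | cons b ss ih =>
    intro si tail h hv
    match si, h with
    | a :: si', h =>
      have hne : si' ≠ [] := by intro hc; rw [hc] at h; simp at h
      obtain ⟨y, hy⟩ : ∃ y, si'.getLast? = some y := by
        cases h' : si'.getLast? with
        | none => exact absurd (List.getLast?_eq_none_iff.mp h') hne
        | some y => exact ⟨y, rfl⟩
      rw [List.getLast?_cons, hy] at hv
      simp only [Option.getD_some, Option.some.injEq] at hv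
      simp only [List.cons_append, List.zip_cons_cons]
      rw [ih si' tail (by simpa using h) (hv ▸ hy)]

-- the invariant tying A's first loop to B's fused loop
def pvInv (max_length : Int) (ast : List (List Char) × List Int)
    (bst : List (List Char) × List Int × List Char × Int) : Prop :=
  ast.2.length = ast.1.length + 1 ∧ ast.2.getLast? = some bst.2.2.2 ∧
    (ast.2.zip ast.1).foldl (pvM max_length) ([], [], [(0 : Int)]) =
      (bst.2.2.1, bst.1, bst.2.1)

theorem pvL4 (cs : List Char) (max_length : Int) (ps : List (Int × Char)) :
    ∀ ast bst, pvInv max_length ast bst →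
    pvInv max_length (ps.foldl (pvAStep1 cs) ast) (ps.foldl (pvBStep cs max_length) bst) := by
  induction ps with
  | nil => intro ast bst h; exact h
  | cons p ps ih =>
    intro ast bst h
    simp only [List.foldl_cons]
    apply ih
    obtain ⟨hlen, hlast, hfold⟩ := h
    by_cases hp : pvPunct p.2
    · have hne : ast.2 ≠ [] := by intro hc; rw [hc] at hlen; simp at hlen
      have hga : PySem.List.pyGetD ast.2 (-1) 0 = bst.2.2.2 := by
        rw [PySem.List.pyGetD_neg_one ast.2 0 hne]
        exact List.getLast_of_mem_getLast? hlast
      unfold pvAStep1 pvBStep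
      rw [if_pos hp, if_pos hp, hga]
      set s := PySem.List.slice cs (some bst.2.2.2) (some (p.1 + 1)) with hs
      have hzip : (ast.2 ++ [p.1 + 1]).zip (ast.1 ++ [s]) = ast.2.zip ast.1 ++ [(bst.2.2.2, s)] :=
        pvL3 s bst.2.2.2 ast.1 ast.2 [p.1 + 1] hlen hlast
      by_cases hov : max_length < (bst.2.2.1.length : Int) + (s.length : Int)
      · rw [if_pos hov]
        refine ⟨by simp [hlen], by simp, ?_⟩
        simp only [hzip, List.foldl_append, hfold, List.foldl_cons, List.foldl_nil, pvM]
        rw [if_pos (by rw [List.length_append]; push_cast at hov ⊢; omega)]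
      · rw [if_neg hov]
        refine ⟨by simp [hlen], by simp, ?_⟩
        simp only [hzip, List.foldl_append, hfold, List.foldl_cons, List.foldl_nil, pvM]
        rw [if_neg (by rw [List.length_append]; push_cast at hov ⊢; omega)]
    · unfold pvAStep1 pvBStep
      rw [if_neg hp, if_neg hp]
      exact ⟨hlen, hlast, hfold⟩

-- finalisation: from related loop states, both ports produce the same output
theorem pvFinal (cs : List Char) (max_length : Int) (ra : List (List Char) × List Int)
    (rb : List (List Char) × List Int × List Char × Int) (h : pvInv max_length ra rb) :
    (((PySem.List.enumerate
          (ra.1 ++ [PySem.List.slice cs (some (PySem.List.pyGetD ra.2 (-1) 0)) none]) 0).foldl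
            (pvAStep2 ra.2 max_length) ([], [], [], [0])).2.2.1 ++
        [((PySem.List.enumerate
          (ra.1 ++ [PySem.List.slice cs (some (PySem.List.pyGetD ra.2 (-1) 0)) none]) 0).foldl
            (pvAStep2 ra.2 max_length) ([], [], [], [0])).1],
      ((PySem.List.enumerate
          (ra.1 ++ [PySem.List.slice cs (some (PySem.List.pyGetD ra.2 (-1) 0)) none]) 0).foldl
            (pvAStep2 ra.2 max_length) ([], [], [], [0])).2.2.2) =
    ((if max_length < (rb.2.2.1.length : Int) +
          ((PySem.List.slice cs (some rb.2.2.2) none).length : Int) then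
        (rb.1 ++ [rb.2.2.1], rb.2.1 ++ [rb.2.2.2], PySem.List.slice cs (some rb.2.2.2) none)
      else (rb.1, rb.2.1, rb.2.2.1 ++ PySem.List.slice cs (some rb.2.2.2) none)).1 ++
        [(if max_length < (rb.2.2.1.length : Int) +
          ((PySem.List.slice cs (some rb.2.2.2) none).length : Int) then
        (rb.1 ++ [rb.2.2.1], rb.2.1 ++ [rb.2.2.2], PySem.List.slice cs (some rb.2.2.2) none)
      else (rb.1, rb.2.1, rb.2.2.1 ++ PySem.List.slice cs (some rb.2.2.2) none)).2.2],
      (if max_length < (rb.2.2.1.length : Int) +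
          ((PySem.List.slice cs (some rb.2.2.2) none).length : Int) then
        (rb.1 ++ [rb.2.2.1], rb.2.1 ++ [rb.2.2.2], PySem.List.slice cs (some rb.2.2.2) none)
      else (rb.1, rb.2.1, rb.2.2.1 ++ PySem.List.slice cs (some rb.2.2.2) none)).2.1) := by
  obtain ⟨hlen, hlast, hfold⟩ := h
  have hne : ra.2 ≠ [] := by intro hc; rw [hc] at hlen; simp at hlen
  have hga : PySem.List.pyGetD ra.2 (-1) 0 = rb.2.2.2 := by
    rw [PySem.List.pyGetD_neg_one ra.2 0 hne]
    exact List.getLast_of_mem_getLast? hlast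
  rw [hga]
  set s := PySem.List.slice cs (some rb.2.2.2) none with hs
  have h1 := pvL1 ra.2 max_length (ra.1 ++ [s]) 0
    (([] : List Char), ([] : List Char), ([] : List (List Char)), [(0 : Int)])
    (by simp [hlen])
  simp only [Nat.cast_zero, List.drop_zero] at h1
  have hzip : ra.2.zip (ra.1 ++ [s]) = ra.2.zip ra.1 ++ [(rb.2.2.2, s)] := by
    have := pvL3 s rb.2.2.2 ra.1 ra.2 [] hlen hlast
    simpa using this
  rw [h1, hzip, List.foldl_append,
    pvL2 max_length (ra.2.zip ra.1) ([] : List Char) ([] : List (List Char)) [(0 : Int)]]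
  simp only [hfold, List.foldl_cons, List.foldl_nil, pvM2]
  rw [show (((rb.2.2.1 ++ s).length : Int)) = (rb.2.2.1.length : Int) + (s.length : Int) from by
    rw [List.length_append]; push_cast; ring]
  by_cases hov : max_length < (rb.2.2.1.length : Int) + (s.length : Int)
  · rw [if_pos hov, if_pos hov]
  · rw [if_neg hov, if_neg hov]

-- the two ports agree on every input (A's assertions are not part of the port; they only
-- raise outside Pre_)
theorem pv_ports_eq (text : String) (max_length : Int) :
    split_text_by_sentence text max_length = split_text_by_sentence_alt text max_length := by
  unfold split_text_by_sentence split_text_by_sentence_alt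
  have h0 : pvInv max_length (([] : List (List Char)), [(0 : Int)])
      (([] : List (List Char)), [(0 : Int)], ([] : List Char), (0 : Int)) :=
    ⟨by simp, by simp, by simp⟩
  have hinv := pvL4 text.toList max_length (PySem.List.enumerate text.toList 0) _ _ h0
  have hfin := pvFinal text.toList max_length _ _ hinv
  exact congrArg (fun q : (List (List Char)) × List Int => (q.1.map String.ofList, q.2))
    (Prod.ext (congrArg Prod.fst hfin) (congrArg Prod.snd hfin)) |>.trans rfl

-- ===== VERDICT (by name: the statement is the Claim_ definition above) =====
theorem split_text_by_sentence_spec : Claim_equal_split_text_by_sentence := by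
  intro text max_length _ _
  unfold Spec_split_text_by_sentence
  exact pv_ports_eq text max_length
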